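-- pv_equiv track=rewrite | github.com/GabrielCCouto/InteligenciaArtificial | EcoResolucao/main.py | solve
-- ===== SOURCE A (Python) =====
-- from collections import deque
--
-- def generate_states(state):
--     states = []
--     for i in range(len(state)):
--         if state[i] == 'V':
--             # Verde pode andar para direita
--             if i + 1 < len(state) and state[i + 1] == '_':
--                 new_state = state.copy()
--                 new_state[i], new_state[i + 1] = new_state[i + 1], new_state[i]
--                 states.append(('move', i, i + 1, new_state))
--             elif i + 2 < len(state) and state[i + 2] == '_':
--                 new_state = state.copy()
--                 new_state[i], new_state[i + 2] = new_state[i + 2], new_state[i]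
--                 states.append(('jump', i, i + 2, new_state))
--
--         elif state[i] == 'M':
--             # Marrom pode andar para esquerda
--             if i - 1 >= 0 and state[i - 1] == '_':
--                 new_state = state.copy()
--                 new_state[i], new_state[i - 1] = new_state[i - 1], new_state[i]
--                 states.append(('move', i, i - 1, new_state))
--             elif i - 2 >= 0 and state[i - 2] == '_':
--                 new_state = state.copy()
--                 new_state[i], new_state[i - 2] = new_state[i - 2], new_state[i]
--                 states.append(('jump', i, i - 2, new_state))
--     return states
--
-- def solve(initial_state, goal_state):
--     queue = deque()
--     visited = set()
--
--     queue.append((initial_state, []))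
--     visited.add(tuple(initial_state))
--
--     while queue:
--         current_state, path = queue.popleft()
--
--         if current_state == goal_state:
--             return path
--
--         for action, from_idx, to_idx, new_state in generate_states(current_state):
--             if tuple(new_state) not in visited:
--                 visited.add(tuple(new_state))
--                 queue.append((new_state, path + [(action, from_idx, to_idx, new_state)]))
--
--     return None
-- ===== SOURCE B (Python) =====
-- from collections import deque
--
-- def generate_states(state):
--     states = []
--     for i in range(len(state)):
--         if state[i] == 'V':
--             if i + 1 < len(state) and state[i + 1] == '_':
--                 new_state = state.copy()
--                 new_state[i], new_state[i + 1] = new_state[i + 1], new_state[i]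
--                 states.append(('move', i, i + 1, new_state))
--             elif i + 2 < len(state) and state[i + 2] == '_':
--                 new_state = state.copy()
--                 new_state[i], new_state[i + 2] = new_state[i + 2], new_state[i]
--                 states.append(('jump', i, i + 2, new_state))
--         elif state[i] == 'M':
--             if i - 1 >= 0 and state[i - 1] == '_':
--                 new_state = state.copy()
--                 new_state[i], new_state[i - 1] = new_state[i - 1], new_state[i]
--                 states.append(('move', i, i - 1, new_state))
--             elif i - 2 >= 0 and state[i - 2] == '_':
--                 new_state = state.copy()
--                 new_state[i], new_state[i - 2] = new_state[i - 2], new_state[i]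
--                 states.append(('jump', i, i - 2, new_state))
--     return states
--
-- def _reconstruct(came_from, key):
--     entry = came_from[key]
--     if entry is None:
--         return []
--     prev_key, record = entry
--     return _reconstruct(came_from, prev_key) + [record]
--
-- def solve(initial_state, goal_state):
--     # parent-pointer BFS: the queue holds bare states; paths are rebuilt at the end
--     came_from = {tuple(initial_state): None}
--     queue = deque([initial_state])
--     while queue:
--         current_state = queue.popleft()
--         if current_state == goal_state:
--             return _reconstruct(came_from, tuple(current_state))
--         for record in generate_states(current_state):
--             key = tuple(record[3])
--             if key not in came_from:
--                 came_from[key] = (tuple(current_state), record)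
--                 queue.append(record[3])
--     return None
-- ===== Notes on version B (the rewrite author's own statement) =====
-- stated objective: alternative
-- what changed: A's BFS stores the full running action path inside every queue entry (copying path+[record] at each enqueue); B's BFS queues bare states and records a came_from parent map, reconstructing the single answer path once at the end, which preserves the exact discovery order and hence the identical path.
import Mathlib
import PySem

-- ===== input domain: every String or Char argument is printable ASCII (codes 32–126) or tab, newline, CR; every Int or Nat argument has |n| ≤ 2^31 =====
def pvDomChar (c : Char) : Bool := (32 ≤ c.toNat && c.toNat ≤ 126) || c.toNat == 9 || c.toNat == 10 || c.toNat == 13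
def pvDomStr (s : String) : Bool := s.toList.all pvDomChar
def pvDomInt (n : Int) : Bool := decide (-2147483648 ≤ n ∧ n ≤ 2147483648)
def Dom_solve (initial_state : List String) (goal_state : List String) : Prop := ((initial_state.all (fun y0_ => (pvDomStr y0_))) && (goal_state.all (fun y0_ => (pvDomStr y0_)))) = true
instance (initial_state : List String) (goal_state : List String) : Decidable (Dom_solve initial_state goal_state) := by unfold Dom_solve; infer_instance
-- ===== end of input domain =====

-- B replaces A's path-in-every-queue-entry BFS by a parent-pointer (came_from) BFS with one
-- final path reconstruction; same frontier and discovery order, so the returned path is identical.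

-- an action record: (action, from_idx, to_idx, new_state)
abbrev PvSt := String × Int × Int × List String

-- new_state[i], new_state[j] = new_state[j], new_state[i]  (i ≠ j, both in range)
def pvSwap (state : List String) (i j : Nat) : List String :=
  (state.set i (state.getD j "")).set j (state.getD i "")

-- shared helper generate_states (identical in Source A and Source B); indices come from range(len(state)),
-- so every access is in range and List.getD is exact
def generateStates (state : List String) : List PvSt :=
  (List.range state.length).foldl (fun states i =>
    if state.getD i "" = "V" then
      if i + 1 < state.length ∧ state.getD (i + 1) "" = "_" then
        states ++ [("move", (i : Int), (i : Int) + 1, pvSwap state i (i + 1))]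
      else if i + 2 < state.length ∧ state.getD (i + 2) "" = "_" then
        states ++ [("jump", (i : Int), (i : Int) + 2, pvSwap state i (i + 2))]
      else states
    else if state.getD i "" = "M" then
      if 1 ≤ i ∧ state.getD (i - 1) "" = "_" then
        states ++ [("move", (i : Int), (i : Int) - 1, pvSwap state i (i - 1))]
      else if 2 ≤ i ∧ state.getD (i - 2) "" = "_" then
        states ++ [("jump", (i : Int), (i : Int) - 2, pvSwap state i (i - 2))]
      else states
    else states) []

-- ===== PORT A =====
-- body of A's inner 'for … in generate_states(…)' loop
def stepA (path : List PvSt)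
    (qv : List (List String × List PvSt) × PySem.Set (List String)) (r : PvSt) :
    List (List String × List PvSt) × PySem.Set (List String) :=
  if PySem.Set.contains qv.2 r.2.2.2 then qv
  else (qv.1 ++ [(r.2.2.2, path ++ [r])], PySem.Set.add qv.2 r.2.2.2)

-- A's 'while queue' loop; the fuel only guards termination (BFS visits each distinct
-- state at most once, so length! + 1 iterations are never exhausted)
def loopA (fuel : Nat) (goal : List String)
    (queue : List (List String × List PvSt)) (visited : PySem.Set (List String)) :
    Option (List PvSt) :=
  match fuel, queue with
  | 0, _ => none
  | _ + 1, [] => none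
  | fuel + 1, (cur, path) :: rest =>
    if cur = goal then some path
    else
      loopA fuel goal ((generateStates cur).foldl (stepA path) (rest, visited)).1
        ((generateStates cur).foldl (stepA path) (rest, visited)).2

def solve (initial_state : List String) (goal_state : List String) :
    Option (List (String × Int × Int × List String)) :=
  loopA (initial_state.length.factorial + 1) goal_state
    [(initial_state, [])] (PySem.Set.add PySem.Set.empty initial_state)

-- ===== PORT B =====
-- _reconstruct: walk came_from back to the start; fuel is a totality guard (the parent
-- chain is finite); none = the KeyError branch Python never reaches on enqueued keys
def pathOf (fuel : Nat) (d : PySem.Dict (List String) (Option (List String × PvSt)))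
    (key : List String) : Option (List PvSt) :=
  match fuel with
  | 0 => none
  | fuel + 1 =>
    match d.get? key with
    | none => none
    | some none => some []
    | some (some (prev, r)) => (pathOf fuel d prev).map (· ++ [r])

-- body of B's inner 'for record in generate_states(…)' loop
def stepB (cur : List String)
    (qd : List (List String) × PySem.Dict (List String) (Option (List String × PvSt))) (r : PvSt) :
    List (List String) × PySem.Dict (List String) (Option (List String × PvSt)) :=
  if qd.2.contains r.2.2.2 then qd
  else (qd.1 ++ [r.2.2.2], qd.2.insert r.2.2.2 (some (cur, r)))

-- B's 'while queue' loop (same fuel guard as A's)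
def loopB (fuel : Nat) (goal : List String)
    (queue : List (List String)) (d : PySem.Dict (List String) (Option (List String × PvSt))) :
    Option (List PvSt) :=
  match fuel, queue with
  | 0, _ => none
  | _ + 1, [] => none
  | fuel + 1, cur :: rest =>
    if cur = goal then pathOf (d.size + 1) d cur
    else
      loopB fuel goal ((generateStates cur).foldl (stepB cur) (rest, d)).1
        ((generateStates cur).foldl (stepB cur) (rest, d)).2

def solve_alt (initial_state : List String) (goal_state : List String) :
    Option (List (String × Int × Int × List String)) :=
  loopB (initial_state.length.factorial + 1) goal_state
    [initial_state] (PySem.Dict.empty.insert initial_state (none : Option (List String × PvSt)))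

-- ===== PRECONDITION & SPEC =====
def Spec_solve (initial_state : List String) (goal_state : List String) (out : Option (List (String × Int × Int × List String))) : Prop := out = solve_alt initial_state goal_state
instance (initial_state : List String) (goal_state : List String) (out : Option (List (String × Int × Int × List String))) : Decidable (Spec_solve initial_state goal_state out) := by unfold Spec_solve; infer_instance

-- ===== CLAIM (what is proved, stated in full; the proofs are below) =====
def Claim_equal_solve : Prop := ∀ (initial_state : List String) (goal_state : List String), Dom_solve initial_state goal_state → Spec_solve initial_state goal_state (solve initial_state goal_state)

-- ===== LEMMAS AND PROOFS =====

-- "reconstructing s from d yields exactly the path p", for every sufficient fuel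
def PathOK (d : PySem.Dict (List String) (Option (List String × PvSt)))
    (s : List String) (p : List PvSt) : Prop :=
  ∀ fuel, d.size < fuel → pathOf fuel d s = some p

-- a successful reconstruction is unaffected by inserting a key it never looks up (a fresh one)
theorem pathOf_insert_fresh (fuel : Nat)
    (d : PySem.Dict (List String) (Option (List String × PvSt)))
    (k : List String) (v : Option (List String × PvSt)) (hk : d.get? k = none) :
    ∀ s p, pathOf fuel d s = some p → pathOf fuel (d.insert k v) s = some p := by
  induction fuel with
  | zero => intro s p h; simp [pathOf] at h
  | succ fuel ih =>
    intro s p h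
    have hne : s ≠ k := by
      intro he; subst he
      simp [pathOf, hk] at h
    rw [pathOf] at h ⊢
    rw [PySem.Dict.get?_insert_of_ne _ _ hne]
    cases hg : d.get? s with
    | none => rw [hg] at h; simp at h
    | some o =>
      rw [hg] at h
      cases o with
      | none => simpa using h
      | some pr =>
        obtain ⟨prev, r⟩ := pr
        simp only [Option.map_eq_some_iff] at h
        obtain ⟨q, hq, hpq⟩ := h
        simp only [Option.map_eq_some_iff]
        exact ⟨q, ih prev q hq, hpq⟩

theorem size_le_size_insert (d : PySem.Dict (List String) (Option (List String × PvSt)))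
    (k : List String) (v : Option (List String × PvSt)) :
    d.size ≤ (d.insert k v).size := by
  rw [PySem.Dict.size_insert]
  split <;> omega

theorem PathOK_insert_fresh {d : PySem.Dict (List String) (Option (List String × PvSt))}
    {k : List String} {v : Option (List String × PvSt)} (hk : d.get? k = none)
    {s : List String} {p : List PvSt} (h : PathOK d s p) : PathOK (d.insert k v) s p := by
  intro fuel hf
  exact pathOf_insert_fresh fuel d k v hk s p
    (h fuel (lt_of_le_of_lt (size_le_size_insert d k v) hf))

-- the two visited structures agree as membership tests
def VisOK (visited : PySem.Set (List String))
    (d : PySem.Dict (List String) (Option (List String × PvSt))) : Prop :=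
  ∀ t, PySem.Set.contains visited t = d.contains t

theorem VisOK_step (visited : PySem.Set (List String))
    (d : PySem.Dict (List String) (Option (List String × PvSt)))
    (hv : VisOK visited d) (k : List String) (v : Option (List String × PvSt)) :
    VisOK (PySem.Set.add visited k) (d.insert k v) := by
  intro t
  rw [Bool.eq_iff_iff, PySem.Set.contains_iff, PySem.Set.mem_add,
      PySem.Dict.contains_iff_mem_keys, PySem.Dict.mem_keys_insert]
  have := hv t
  rw [Bool.eq_iff_iff, PySem.Set.contains_iff, PySem.Dict.contains_iff_mem_keys] at this
  tauto

-- the inner for-loops keep the two states aligned: B's queue is A's without the paths,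
-- membership tests agree, and every stored path is reconstructible from came_from
theorem fold_inv (items : List PvSt) :
    ∀ (q : List (List String × List PvSt)) (visited : PySem.Set (List String))
      (d : PySem.Dict (List String) (Option (List String × PvSt)))
      (p : List PvSt) (cur : List String),
    VisOK visited d → PathOK d cur p → (∀ s pp, (s, pp) ∈ q → PathOK d s pp) →
    (items.foldl (stepB cur) (q.map Prod.fst, d)).1
        = (items.foldl (stepA p) (q, visited)).1.map Prod.fst ∧
    VisOK (items.foldl (stepA p) (q, visited)).2 (items.foldl (stepB cur) (q.map Prod.fst, d)).2 ∧
    PathOK (items.foldl (stepB cur) (q.map Prod.fst, d)).2 cur p ∧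
    (∀ s pp, (s, pp) ∈ (items.foldl (stepA p) (q, visited)).1 →
        PathOK (items.foldl (stepB cur) (q.map Prod.fst, d)).2 s pp) := by
  induction items with
  | nil => intro q visited d p cur hv hcur hq; exact ⟨rfl, hv, hcur, hq⟩
  | cons r items ih =>
    intro q visited d p cur hv hcur hq
    simp only [List.foldl_cons]
    by_cases hc : d.contains r.2.2.2 = true
    · have hA : stepA p (q, visited) r = (q, visited) := by
        simp only [stepA]; rw [hv r.2.2.2, hc]; simp
      have hB : stepB cur (q.map Prod.fst, d) r = (q.map Prod.fst, d) := by
        simp [stepB, hc]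
      rw [hA, hB]
      exact ih q visited d p cur hv hcur hq
    · have hcb : d.contains r.2.2.2 = false := by simpa using hc
      have hgn : d.get? r.2.2.2 = none := by
        rw [PySem.Dict.get?_eq_none_iff_contains, hcb]
      have hA : stepA p (q, visited) r
          = (q ++ [(r.2.2.2, p ++ [r])], PySem.Set.add visited r.2.2.2) := by
        simp only [stepA]; rw [hv r.2.2.2, hcb]; simp
      have hB : stepB cur (q.map Prod.fst, d) r
          = (q.map Prod.fst ++ [r.2.2.2], d.insert r.2.2.2 (some (cur, r))) := by
        simp [stepB, hcb]
      rw [hA, hB]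
      have hmap : q.map Prod.fst ++ [r.2.2.2]
          = (q ++ [(r.2.2.2, p ++ [r])]).map Prod.fst := by simp
      rw [hmap]
      refine ih (q ++ [(r.2.2.2, p ++ [r])]) (PySem.Set.add visited r.2.2.2)
        (d.insert r.2.2.2 (some (cur, r))) p cur (VisOK_step visited d hv _ _)
        (PathOK_insert_fresh hgn hcur) ?_
      intro s pp hmem
      rcases List.mem_append.mp hmem with hmem | hmem
      · exact PathOK_insert_fresh hgn (hq s pp hmem)
      · simp only [List.mem_singleton, Prod.mk.injEq] at hmem
        obtain ⟨hs, hpp⟩ := hmem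
        subst hs; subst hpp
        -- the freshly inserted child: unfold one reconstruction step
        intro fuel hf
        have hf' : d.size + 1 < fuel := by
          rw [PySem.Dict.size_insert, hcb] at hf; simpa using hf
        obtain ⟨f, rfl⟩ : ∃ f, fuel = f + 1 := ⟨fuel - 1, by omega⟩
        rw [pathOf, PySem.Dict.get?_insert_self]
        have hpar : pathOf f (d.insert r.2.2.2 (some (cur, r))) cur = some p :=
          pathOf_insert_fresh f d _ _ hgn cur p (hcur f (by omega))
        simp [hpar]

-- the two while-loops agree step for step
theorem loop_eq (fuel : Nat) :
    ∀ (goal : List String) (q : List (List String × List PvSt))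
      (visited : PySem.Set (List String))
      (d : PySem.Dict (List String) (Option (List String × PvSt))),
    VisOK visited d → (∀ s pp, (s, pp) ∈ q → PathOK d s pp) →
    loopA fuel goal q visited = loopB fuel goal (q.map Prod.fst) d := by
  induction fuel with
  | zero => intro goal q visited d _ _; rfl
  | succ fuel ih =>
    intro goal q visited d hv hq
    match q with
    | [] => rfl
    | (cur, path) :: rest =>
      simp only [List.map_cons]
      rw [loopA, loopB]
      by_cases hg : cur = goal
      · rw [if_pos hg, if_pos hg]
        exact (hq cur path (by simp) (d.size + 1) (by omega)).symm
      · rw [if_neg hg, if_neg hg]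
        obtain ⟨h1, h2, _, h4⟩ := fold_inv (generateStates cur) rest visited d path cur hv
          (hq cur path (by simp)) (fun s pp hm => hq s pp (List.mem_cons_of_mem _ hm))
        rw [ih goal _ _ _ h2 h4, h1]

-- ===== VERDICT (by name: the statement is the Claim_ definition above) =====
theorem solve_spec : Claim_equal_solve := by
  intro initial_state goal_state _
  unfold Spec_solve solve solve_alt
  have h := loop_eq (initial_state.length.factorial + 1) goal_state
    [(initial_state, [])] (PySem.Set.add PySem.Set.empty initial_state)
    (PySem.Dict.empty.insert initial_state (none : Option (List String × PvSt)))
    ?_ ?_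
  · simpa using h
  · intro t
    rw [Bool.eq_iff_iff, PySem.Set.contains_iff, PySem.Set.mem_add,
        PySem.Dict.contains_iff_mem_keys, PySem.Dict.mem_keys_insert]
    simp [PySem.Set.empty]
  · intro s pp hm
    simp only [List.mem_singleton, Prod.mk.injEq] at hm
    obtain ⟨hs, hpp⟩ := hm
    subst hs; subst hpp
    intro fuel hf
    obtain ⟨f, rfl⟩ : ∃ f, fuel = f + 1 := ⟨fuel - 1, by omega⟩
    rw [pathOf, PySem.Dict.get?_insert_self]
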